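-- pv_equiv track=rewrite | github.com/vinenoob/gu-discord-bot | bot/heck/logic.py | heckin
-- ===== SOURCE A (Python) =====
-- HECK_LIST = ["heck", "hell", "darn", "david", "heckin", "fack", "scheiss", "fetch", "fetching", "fetchin", "dang", "shrimp", "johnathan"] #all the things to respond to
--
-- def heckin(message: str):
--     holy = ""
--     for watch in HECK_LIST: #for each word in our watch list
--         for word in message.split():
--             if watch == word.lower(): #if we find what we are looking for
--                 holy = "Not in my christian minecraft server :sunglasses: "
--                 return True, holy
--     return False, holy
-- ===== SOURCE B (Python) =====
-- HECK_LIST = ["heck", "hell", "darn", "david", "heckin", "fack", "scheiss", "fetch", "fetching", "fetchin", "dang", "shrimp", "johnathan"]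
-- _WATCH = frozenset(HECK_LIST)
-- _HOLY = "Not in my christian minecraft server :sunglasses: "
--
-- def heckin(message: str):
--     # one streaming pass over the characters: build the current lowercased word,
--     # test it at every whitespace boundary (and at the end)
--     cur = []
--     for ch in message:
--         if ch.isspace():
--             if "".join(cur) in _WATCH:
--                 return True, _HOLY
--             cur = []
--         else:
--             cur.append(ch.lower())
--     if "".join(cur) in _WATCH:
--         return True, _HOLY
--     return False, ""
-- ===== Notes on version B (the rewrite author's own statement) =====
-- stated objective: alternative
-- what changed: Replaces A's 13 passes that each re-split the message and rescan its words with a single streaming character-level pass that accumulates the current lowercased word and tests it against a precomputed watch set at each whitespace boundary.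
import Mathlib
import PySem

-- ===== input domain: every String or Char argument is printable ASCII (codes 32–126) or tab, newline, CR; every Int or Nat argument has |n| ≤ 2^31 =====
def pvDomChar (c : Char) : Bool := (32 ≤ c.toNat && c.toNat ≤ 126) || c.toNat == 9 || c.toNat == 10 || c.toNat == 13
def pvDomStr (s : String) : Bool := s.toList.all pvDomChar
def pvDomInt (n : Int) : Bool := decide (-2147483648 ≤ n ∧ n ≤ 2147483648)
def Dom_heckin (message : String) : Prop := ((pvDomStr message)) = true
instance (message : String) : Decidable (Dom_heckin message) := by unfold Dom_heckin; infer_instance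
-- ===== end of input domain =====

-- B replaces A's 13 re-split-and-scan passes with a single streaming pass over the characters,
-- accumulating the current lowercased word and testing it at each whitespace boundary (alternative; same return value).

def HECK_LIST : List String :=
  ["heck", "hell", "darn", "david", "heckin", "fack", "scheiss", "fetch",
   "fetching", "fetchin", "dang", "shrimp", "johnathan"]

def holyStr : String := "Not in my christian minecraft server :sunglasses: "

-- ===== PORT A =====
-- inner loop: for word in message.split(): if watch == word.lower(): return True, holy
def heckinInner (watch : String) : List String → Option (Bool × String)
  | [] => none
  | w :: ws => if watch = PySem.Str.lower w then some (true, holyStr) else heckinInner watch ws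

-- outer loop over HECK_LIST
def heckinOuter (words : List String) : List String → Bool × String
  | [] => (false, "")
  | watch :: rest =>
    match heckinInner watch words with
    | some r => r
    | none => heckinOuter words rest

def heckin (message : String) : Bool × String :=
  heckinOuter (PySem.Str.split₀ message) HECK_LIST

-- ===== PORT B =====
-- _WATCH = frozenset(HECK_LIST)
def watchSet : PySem.Set (List Char) := PySem.Set.ofList (HECK_LIST.map String.toList)

-- the streaming character loop of Source B: cur is the current lowercased word;
-- at each whitespace char (and at the end) 'cur in _WATCH' is tested, else cur grows
def altLoop (cur : List Char) : List Char → Bool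
  | [] => PySem.Set.contains watchSet cur
  | c :: cs =>
    if PySem.Chars.isspace c then
      PySem.Set.contains watchSet cur || altLoop [] cs
    else
      altLoop (cur ++ [PySem.Chars.lowerChar c]) cs

def heckin_alt (message : String) : Bool × String :=
  if altLoop [] message.toList then (true, holyStr) else (false, "")

-- ===== PRECONDITION & SPEC =====
def Spec_heckin (message : String) (out : Bool × String) : Prop := out = heckin_alt message
instance (message : String) (out : Bool × String) : Decidable (Spec_heckin message out) := by unfold Spec_heckin; infer_instance

-- ===== CLAIM (what is proved, stated in full; the proofs are below) =====
def Claim_equal_heckin : Prop := ∀ (message : String), Dom_heckin message → Spec_heckin message (heckin message)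

-- ===== LEMMAS AND PROOFS =====

-- A's inner scan finds a hit iff some word lowers to the watchword
theorem heckinInner_eq (watch : String) (ws : List String) :
    heckinInner watch ws =
      if ws.any (fun w => watch = PySem.Str.lower w) then some (true, holyStr) else none := by
  induction ws with
  | nil => simp [heckinInner]
  | cons w ws ih =>
    by_cases h : watch = PySem.Str.lower w <;> simp [heckinInner, h, ih]

-- A's outer loop in closed form
theorem heckinOuter_eq (words L : List String) :
    heckinOuter words L =
      if L.any (fun watch => words.any (fun w => watch = PySem.Str.lower w))
      then (true, holyStr) else (false, "") := by
  induction L with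
  | nil => simp [heckinOuter]
  | cons watch rest ih =>
    rw [heckinOuter, heckinInner_eq, List.any_cons]
    cases h : (words.any fun w => decide (watch = PySem.Str.lower w)) with
    | true => simp
    | false => rw [Bool.false_or, ih]; rfl

-- split₀.go's accumulator only prepends finished words
theorem split₀_go_acc (cs : List Char) (cur : List Char) (acc : List (List Char)) :
    PySem.Chars.split₀.go cs cur acc = acc.reverse ++ PySem.Chars.split₀.go cs cur [] := by
  induction cs generalizing cur acc with
  | nil =>
    by_cases h : cur.isEmpty <;> simp [PySem.Chars.split₀.go, h]
  | cons c cs ih =>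
    by_cases hs : PySem.Chars.isspace c
    · by_cases h : cur.isEmpty
      · simp only [PySem.Chars.split₀.go, hs, h, if_true]
        exact ih [] acc
      · simp only [PySem.Chars.split₀.go, hs, h, if_true, if_false, Bool.false_eq_true]
        rw [ih [] (cur.reverse :: acc), ih [] [cur.reverse]]
        simp
    · simp only [PySem.Chars.split₀.go, hs, Bool.false_eq_true, if_false]
      exact ih (c :: cur) acc

-- B's streaming loop = "some word of split₀ lowers into the watch set"
theorem altLoop_eq (cs : List Char) (cur : List Char) :
    altLoop (PySem.Chars.lower cur.reverse) cs =
      (PySem.Chars.split₀.go cs cur []).any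
        (fun w => PySem.Set.contains watchSet (PySem.Chars.lower w)) := by
  induction cs generalizing cur with
  | nil =>
    by_cases h : cur.isEmpty
    · have : cur = [] := by simpa [List.isEmpty_iff] using h
      subst this
      simp [altLoop, PySem.Chars.split₀.go, PySem.Chars.lower]
      decide
    · simp [altLoop, PySem.Chars.split₀.go, h]
  | cons c cs ih =>
    by_cases hs : PySem.Chars.isspace c
    · by_cases h : cur.isEmpty
      · have : cur = [] := by simpa [List.isEmpty_iff] using h
        subst this
        have hw : PySem.Set.contains watchSet (PySem.Chars.lower ([] : List Char).reverse) = false := by decide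
        simp only [altLoop, hs, if_true, PySem.Chars.split₀.go, List.isEmpty_nil]
        rw [hw, Bool.false_or]
        have := ih []
        simpa [PySem.Chars.lower] using this
      · simp only [altLoop, hs, if_true, PySem.Chars.split₀.go, h, Bool.false_eq_true, if_false]
        rw [split₀_go_acc cs [] [cur.reverse]]
        have h2 := ih []
        simp only [List.reverse_nil, PySem.Chars.lower, List.map_nil] at h2
        rw [h2]
        simp [PySem.Set.contains, PySem.Chars.lower]
    · simp only [altLoop, hs, Bool.false_eq_true, if_false, PySem.Chars.split₀.go]
      have : PySem.Chars.lower cur.reverse ++ [PySem.Chars.lowerChar c]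
           = PySem.Chars.lower ((c :: cur).reverse) := by
        simp [PySem.Chars.lower]
      rw [this]
      exact ih (c :: cur)

-- membership in the watch set of char lists ↔ some watchword equals the lowered word
theorem contains_watchSet_iff (x : List Char) :
    PySem.Set.contains watchSet x = true ↔ ∃ watch ∈ HECK_LIST, watch.toList = x := by
  constructor
  · intro h
    have hx : x ∈ watchSet := by
      simpa [PySem.Set.contains] using h
    rw [watchSet, PySem.Set.mem_ofList, List.mem_map] at hx
    obtain ⟨w, hw, hwx⟩ := hx
    exact ⟨w, hw, hwx⟩
  · rintro ⟨w, hw, rfl⟩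
    have : w.toList ∈ watchSet := by
      rw [watchSet, PySem.Set.mem_ofList, List.mem_map]
      exact ⟨w, hw, rfl⟩
    simpa [PySem.Set.contains] using this

-- ===== VERDICT (by name: the statement is the Claim_ definition above) =====
theorem heckin_spec : Claim_equal_heckin := by
  intro message _
  unfold Spec_heckin heckin heckin_alt
  rw [heckinOuter_eq]
  have hB : altLoop [] message.toList =
      (PySem.Chars.split₀ message.toList).any
        (fun w => PySem.Set.contains watchSet (PySem.Chars.lower w)) := by
    have := altLoop_eq message.toList []
    simpa [PySem.Chars.lower, PySem.Chars.split₀] using this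
  rw [hB]
  have hiff :
      (HECK_LIST.any (fun watch =>
          (PySem.Str.split₀ message).any (fun w => watch = PySem.Str.lower w)) = true) ↔
      ((PySem.Chars.split₀ message.toList).any
        (fun w => PySem.Set.contains watchSet (PySem.Chars.lower w)) = true) := by
    constructor
    · intro h
      rw [List.any_eq_true] at h
      obtain ⟨watch, hwatch, hin⟩ := h
      rw [List.any_eq_true] at hin
      obtain ⟨w, hwmem, heq⟩ := hin
      have heq' : watch = PySem.Str.lower w := of_decide_eq_true heq
      rw [List.any_eq_true]
      refine ⟨w.toList, ?_, ?_⟩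
      · rw [← PySem.Str.split₀_map_toList]
        exact List.mem_map_of_mem hwmem
      · rw [contains_watchSet_iff]
        refine ⟨watch, hwatch, ?_⟩
        rw [heq']
        simp [PySem.Str.lower]
    · intro h
      rw [List.any_eq_true] at h
      obtain ⟨cs, hcs, hc⟩ := h
      rw [← PySem.Str.split₀_map_toList, List.mem_map] at hcs
      obtain ⟨ws, hws, hcast⟩ := hcs
      rw [contains_watchSet_iff] at hc
      obtain ⟨watch, hwatch, hweq⟩ := hc
      rw [List.any_eq_true]
      refine ⟨watch, hwatch, ?_⟩
      rw [List.any_eq_true]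
      refine ⟨ws, hws, ?_⟩
      apply decide_eq_true
      apply String.toList_inj.mp
      rw [hweq, ← hcast]
      simp [PySem.Str.lower]
  by_cases h : HECK_LIST.any (fun watch =>
      (PySem.Str.split₀ message).any (fun w => watch = PySem.Str.lower w)) = true
  · rw [if_pos h, if_pos (hiff.mp h)]
  · rw [if_neg h, if_neg (fun hc => h (hiff.mpr hc))]
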